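-- pv_equiv track=rewrite | github.com/chungoid/chungoid | src/chungoid/protocols/universal/tool_use.py | _analyze_constraints
-- ===== SOURCE A (Python) =====
-- from typing import Any, Dict, List, Optional, Set, Tuple
--
-- def _analyze_constraints(tools: Dict[str, Any]) -> Dict[str, List[str]]:
--     """Analyze constraints for tool usage."""
--     constraints = {}
--
--     for tool_name in tools.keys():
--         tool_constraints = []
--
--         # Analyze common constraints
--         if "filesystem" in tool_name:
--             tool_constraints.extend(["file_permissions", "disk_space", "path_access"])
--         elif "terminal" in tool_name:
--             tool_constraints.extend(["execution_permissions", "environment_variables", "command_availability"])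
--         elif "chroma" in tool_name:
--             tool_constraints.extend(["database_connection", "collection_access", "memory_limits"])
--         elif "content" in tool_name:
--             tool_constraints.extend(["network_access", "content_size_limits", "format_support"])
--
--         constraints[tool_name] = tool_constraints
--
--     return constraints
-- ===== SOURCE B (Python) =====
-- # Different algorithm shape: instead of classifying each key with an if/elif
-- # chain (key-major), B makes one pass over the keys PER CATEGORY, in reverse
-- # priority order, unconditionally overwriting matches so that the last write
-- # (= highest-priority category) wins; a final pass assembles the result dict.
-- _CONSTRAINT_TABLE = [
--     ("filesystem", ["file_permissions", "disk_space", "path_access"]),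
--     ("terminal", ["execution_permissions", "environment_variables", "command_availability"]),
--     ("chroma", ["database_connection", "collection_access", "memory_limits"]),
--     ("content", ["network_access", "content_size_limits", "format_support"]),
-- ]
--
-- def _analyze_constraints(tools):
--     """Analyze constraints for tool usage."""
--     keys = list(tools.keys())
--     assigned = {}
--     for sub, labels in reversed(_CONSTRAINT_TABLE):
--         for k in keys:
--             if sub in k:
--                 assigned[k] = list(labels)
--     return {k: assigned.get(k, []) for k in keys}
-- ===== Notes on version B (the rewrite author's own statement) =====
-- stated objective: alternative
-- what changed: Replaces A's key-major if/elif classification with category-major staged passes: one sweep over the keys per constraint category, iterated in reverse priority order with unconditional overwrite so the last write equals the first match, then a final assembly pass.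
import Mathlib
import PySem

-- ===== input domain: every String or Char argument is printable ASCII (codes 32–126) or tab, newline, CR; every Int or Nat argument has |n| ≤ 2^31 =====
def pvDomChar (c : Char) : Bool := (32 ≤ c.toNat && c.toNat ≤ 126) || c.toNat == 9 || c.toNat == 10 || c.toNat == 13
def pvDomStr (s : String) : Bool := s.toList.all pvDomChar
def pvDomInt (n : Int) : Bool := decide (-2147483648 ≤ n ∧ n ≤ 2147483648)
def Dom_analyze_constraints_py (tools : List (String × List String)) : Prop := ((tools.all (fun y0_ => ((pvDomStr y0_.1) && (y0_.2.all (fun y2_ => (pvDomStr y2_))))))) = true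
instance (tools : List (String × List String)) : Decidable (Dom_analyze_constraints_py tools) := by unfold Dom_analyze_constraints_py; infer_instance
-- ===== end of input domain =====

-- B replaces A's key-major if/elif classification by category-major staged
-- passes (one sweep of the keys per category, in reverse priority order with
-- unconditional overwrite), then a final assembly pass (objective: alternative).

-- ===== PORT A =====
-- per-key body of A's loop: the if/elif chain extending tool_constraints
def pvALabels (tool_name : String) : List String :=
  let tool_constraints : List String := []
  if PySem.Str.isIn "filesystem" tool_name then
    tool_constraints ++ ["file_permissions", "disk_space", "path_access"]
  else if PySem.Str.isIn "terminal" tool_name then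
    tool_constraints ++ ["execution_permissions", "environment_variables", "command_availability"]
  else if PySem.Str.isIn "chroma" tool_name then
    tool_constraints ++ ["database_connection", "collection_access", "memory_limits"]
  else if PySem.Str.isIn "content" tool_name then
    tool_constraints ++ ["network_access", "content_size_limits", "format_support"]
  else tool_constraints

def analyze_constraints_py (tools : List (String × List String)) : List (String × List String) :=
  -- tools.keys(): the dict's keys, i.e. first occurrences in order
  let keys := PySem.List.dedup (tools.map (·.1))
  (keys.foldl (fun constraints tool_name =>
      constraints.insert tool_name (pvALabels tool_name)) PySem.Dict.empty).items

-- ===== PORT B =====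
def pvTable : List (String × List String) :=
  [("filesystem", ["file_permissions", "disk_space", "path_access"]),
   ("terminal", ["execution_permissions", "environment_variables", "command_availability"]),
   ("chroma", ["database_connection", "collection_access", "memory_limits"]),
   ("content", ["network_access", "content_size_limits", "format_support"])]

def analyze_constraints_py_alt (tools : List (String × List String)) : List (String × List String) :=
  let keys := PySem.List.dedup (tools.map (·.1))
  let assigned := pvTable.reverse.foldl (fun d (e : String × List String) =>
      keys.foldl (fun d k => if PySem.Str.isIn e.1 k then d.insert k e.2 else d) d)
    PySem.Dict.empty
  keys.map (fun k => (k, assigned.getD k []))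

-- ===== PRECONDITION & SPEC =====
def Spec_analyze_constraints_py (tools : List (String × List String)) (out : List (String × List String)) : Prop := out = analyze_constraints_py_alt tools
instance (tools : List (String × List String)) (out : List (String × List String)) : Decidable (Spec_analyze_constraints_py tools out) := by unfold Spec_analyze_constraints_py; infer_instance

-- ===== CLAIM (what is proved, stated in full; the proofs are below) =====
def Claim_equal_analyze_constraints_py : Prop := ∀ (tools : List (String × List String)), Dom_analyze_constraints_py tools → Spec_analyze_constraints_py tools (analyze_constraints_py tools)

-- ===== LEMMAS AND PROOFS =====
-- one category sweep: the inner fold inserts `labels` at exactly the matching keys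
theorem pvInner (keys : List String) (sub : String) (labels : List String)
    (d : PySem.Dict String (List String)) (k : String) :
    (keys.foldl (fun d k' => if PySem.Str.isIn sub k' then d.insert k' labels else d) d).get? k
      = if k ∈ keys ∧ PySem.Str.isIn sub k then some labels else d.get? k := by
  induction keys generalizing d with
  | nil => simp
  | cons a l ih =>
    simp only [List.foldl_cons, ih]
    by_cases hm : PySem.Str.isIn sub k = true <;> by_cases hka : k = a <;>
      by_cases hkl : k ∈ l <;>
      simp_all [PySem.Str.isIn] <;>
      split_ifs <;> simp [PySem.Dict.get?_insert, hka]

-- the reversed category-major fold ends with each key's FIRST matching entry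
theorem pvOuter (T : List (String × List String)) (keys : List String) (k : String)
    (hk : k ∈ keys) (d : PySem.Dict String (List String)) :
    (T.reverse.foldl (fun d (e : String × List String) =>
        keys.foldl (fun d k' => if PySem.Str.isIn e.1 k' then d.insert k' e.2 else d) d) d).get? k
      = match T.find? (fun e => PySem.Str.isIn e.1 k) with
        | some e => some e.2
        | none => d.get? k := by
  rw [List.foldl_reverse]
  induction T with
  | nil => simp
  | cons e t ih =>
    simp only [List.foldr_cons, pvInner, List.find?]
    by_cases hm : PySem.Str.isIn e.1 k = true <;> simp_all [PySem.Str.isIn]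

theorem pvALabels_eq_find (k : String) :
    pvALabels k = (match pvTable.find? (fun e => PySem.Str.isIn e.1 k) with
                   | some e => e.2
                   | none => []) := by
  simp only [pvALabels, pvTable, List.find?]
  cases h1 : PySem.Str.isIn "filesystem" k <;>
  cases h2 : PySem.Str.isIn "terminal" k <;>
  cases h3 : PySem.Str.isIn "chroma" k <;>
  cases h4 : PySem.Str.isIn "content" k <;> simp_all

theorem pvFoldItems (l : List String) (hl : l.Nodup) :
    (l.foldl (fun d n => d.insert n (pvALabels n)) PySem.Dict.empty).items
      = l.map (fun n => (n, pvALabels n)) := by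
  simpa using PySem.Dict.items_foldl_insert_fresh (l := l) (k := fun n => n)
    (v := pvALabels) (d := PySem.Dict.empty)
    (fun a _ => PySem.Dict.contains_empty a) (by simpa using hl)

-- ===== VERDICT (by name: the statement is the Claim_ definition above) =====
theorem analyze_constraints_py_spec : Claim_equal_analyze_constraints_py := by
  intro tools _
  show (((PySem.List.dedup (tools.map (·.1))).foldl
      (fun constraints tool_name => constraints.insert tool_name (pvALabels tool_name))
      PySem.Dict.empty).items) = analyze_constraints_py_alt tools
  rw [pvFoldItems _ (PySem.List.nodup_dedup _)]
  unfold analyze_constraints_py_alt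
  apply List.map_congr_left
  intro k hk
  rw [PySem.Dict.getD_eq_get?_getD, pvOuter _ _ _ hk, pvALabels_eq_find]
  cases pvTable.find? (fun e => PySem.Str.isIn e.1 k) <;> simp
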